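-- pv_equiv track=rewrite | github.com/Lokesh-050605/DevAssist | command_generator.py | enforce_correct_command
-- ===== SOURCE A (Python) =====
-- def enforce_correct_command(user_input, command):
--     """
--     Ensures AI-generated commands are correctly formatted based on file extensions.
--     """
--     file_extensions = {
--         ".py": "python {}",
--         ".java": "javac {} && java {}",
--         ".c": "gcc {} -o {} && {}",
--         ".cpp": "g++ {} -o {} && {}",
--         ".js": "node {}",
--         ".go": "go run {}",
--         ".sh": "bash {}",
--     }
--
--     words = user_input.split()
--     for word in words:
--         for ext, cmd in file_extensions.items():
--             if word.endswith(ext):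
--                 filename = word.replace(ext, "")
--                 if "{}" in cmd:
--                     return cmd.format(word, filename, filename)  # Format for compiled languages
--                 return cmd.format(word)  # Format for interpreted languages
--
--     return command  # Return AI response if no modification is needed
-- ===== SOURCE B (Python) =====
-- def enforce_correct_command(user_input, command):
--     """
--     Ensures AI-generated commands are correctly formatted based on file extensions.
--     """
--     file_extensions = {
--         ".py": "python {}",
--         ".java": "javac {} && java {}",
--         ".c": "gcc {} -o {} && {}",
--         ".cpp": "g++ {} -o {} && {}",
--         ".js": "node {}",
--         ".go": "go run {}",
--         ".sh": "bash {}",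
--     }
--
--     for word in user_input.split():
--         _head, sep, tail = word.rpartition(".")
--         if sep:
--             cmd = file_extensions.get(sep + tail)
--             if cmd is not None:
--                 filename = word.replace(sep + tail, "")
--                 return cmd.format(word, filename, filename)
--     return command
-- ===== Notes on version B (the rewrite author's own statement) =====
-- stated objective: simpler
-- what changed: B extracts each word's extension once via rpartition('.') and does a single dict lookup instead of A's inner loop testing endswith for every extension, and collapses A's always-true '{}' branch into one format call.
import Mathlib
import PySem

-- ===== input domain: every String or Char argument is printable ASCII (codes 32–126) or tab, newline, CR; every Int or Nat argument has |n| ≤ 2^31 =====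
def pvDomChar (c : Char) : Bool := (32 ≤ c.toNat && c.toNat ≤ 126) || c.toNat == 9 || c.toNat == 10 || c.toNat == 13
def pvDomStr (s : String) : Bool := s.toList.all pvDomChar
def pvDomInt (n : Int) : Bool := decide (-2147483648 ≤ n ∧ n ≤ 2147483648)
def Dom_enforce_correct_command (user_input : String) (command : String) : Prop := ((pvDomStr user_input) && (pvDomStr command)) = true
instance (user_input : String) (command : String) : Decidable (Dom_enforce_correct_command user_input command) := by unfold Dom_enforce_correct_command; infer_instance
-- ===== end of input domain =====

-- B replaces A's inner scan over all seven extensions (endswith each) by one rpartition('.')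
-- giving the word's extension and a single dict lookup, collapsing the always-true '{}' branch;
-- objective: simpler.

-- hand port of str.format, exact for format strings containing only plain '{}' fields
-- and called with at least as many positional args as fields (true for every call both ports make)
def pvFormat : List Char → List (List Char) → List Char
  | [], _ => []
  | '{' :: '}' :: rest, a :: args => a ++ pvFormat rest args
  | c :: rest, args => c :: pvFormat rest args

-- the file_extensions dict literal, shared by both ports (items in insertion order)
def pvExts : List (List Char × List Char) :=
  [ (".py".toList, "python {}".toList)
  , (".java".toList, "javac {} && java {}".toList)
  , (".c".toList, "gcc {} -o {} && {}".toList)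
  , (".cpp".toList, "g++ {} -o {} && {}".toList)
  , (".js".toList, "node {}".toList)
  , (".go".toList, "go run {}".toList)
  , (".sh".toList, "bash {}".toList) ]

-- ===== PORT A =====
-- inner loop: for ext, cmd in file_extensions.items(): if word.endswith(ext): …
def pvInnerA (pairs : List (List Char × List Char)) (word : List Char) : Option (List Char) :=
  match pairs with
  | [] => none
  | (ext, cmd) :: rest =>
    if PySem.Chars.endswith word ext then
      let filename := PySem.Chars.replace word ext []
      if PySem.Chars.isIn ['{', '}'] cmd then some (pvFormat cmd [word, filename, filename])
      else some (pvFormat cmd [word])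
    else pvInnerA rest word

-- outer loop: for word in words (the first word returning wins)
def pvOuterA (words : List (List Char)) : Option (List Char) :=
  match words with
  | [] => none
  | w :: ws =>
    match pvInnerA pvExts w with
    | some r => some r
    | none => pvOuterA ws

def enforce_correct_command (user_input : String) (command : String) : String :=
  match pvOuterA (PySem.Chars.split₀ user_input.toList) with
  | some r => String.ofList r
  | none => command

-- ===== PORT B =====
-- hand port of word.rpartition('.') restricted to what B uses: none if '.' not in word,
-- else some (sep + tail), the suffix of word starting at its LAST '.'
def pvRPartDot : List Char → Option (List Char)
  | [] => none
  | c :: cs =>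
    match pvRPartDot cs with
    | some s => some s
    | none => if c = '.' then some (c :: cs) else none

def pvDictB : PySem.Dict (List Char) (List Char) := PySem.Dict.mk pvExts

def pvOuterB (words : List (List Char)) : Option (List Char) :=
  match words with
  | [] => none
  | w :: ws =>
    match pvRPartDot w with
    | none => pvOuterB ws
    | some ext =>
      match pvDictB.get? ext with
      | none => pvOuterB ws
      | some cmd =>
        let filename := PySem.Chars.replace w ext []
        some (pvFormat cmd [w, filename, filename])

def enforce_correct_command_alt (user_input : String) (command : String) : String :=
  match pvOuterB (PySem.Chars.split₀ user_input.toList) with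
  | some r => String.ofList r
  | none => command

-- ===== PRECONDITION & SPEC =====
def Spec_enforce_correct_command (user_input : String) (command : String) (out : String) : Prop := out = enforce_correct_command_alt user_input command
instance (user_input : String) (command : String) (out : String) : Decidable (Spec_enforce_correct_command user_input command out) := by unfold Spec_enforce_correct_command; infer_instance

-- ===== CLAIM (what is proved, stated in full; the proofs are below) =====
def Claim_equal_enforce_correct_command : Prop := ∀ (user_input : String) (command : String), Dom_enforce_correct_command user_input command → Spec_enforce_correct_command user_input command (enforce_correct_command user_input command)

-- ===== LEMMAS AND PROOFS =====

-- a dict key is a good extension: starts with '.', rest dot-free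
def pvGoodExt (e : List Char) : Prop := e.head? = some '.' ∧ '.' ∉ e.tail

lemma pvRPartDot_none_of_no_dot (l : List Char) (h : '.' ∉ l) : pvRPartDot l = none := by
  induction l with
  | nil => rfl
  | cons c cs ih =>
    simp only [List.mem_cons, not_or] at h
    have hc : ¬ c = '.' := fun hh => h.1 hh.symm
    simp [pvRPartDot, ih h.2, hc]

lemma pvRPartDot_append (pre t : List Char) (h : '.' ∉ t) :
    pvRPartDot (pre ++ '.' :: t) = some ('.' :: t) := by
  induction pre with
  | nil => simp [pvRPartDot, pvRPartDot_none_of_no_dot t h]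
  | cons c cs ih => simp [pvRPartDot, ih]

lemma pvRPartDot_suffix {w s : List Char} (h : pvRPartDot w = some s) : s <:+ w := by
  induction w with
  | nil => simp [pvRPartDot] at h
  | cons c cs ih =>
    simp only [pvRPartDot] at h
    cases hc : pvRPartDot cs with
    | some s' =>
      rw [hc] at h; cases h
      exact (ih hc).trans (List.suffix_cons c cs)
    | none =>
      rw [hc] at h
      by_cases hdot : c = '.'
      · subst hdot; simp at h; rw [← h]
      · simp [hdot] at h

lemma pvEndswith_iff_rpart {w e : List Char} (he : pvGoodExt e) :
    PySem.Chars.endswith w e = true ↔ pvRPartDot w = some e := by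
  obtain ⟨h1, ht⟩ := he
  cases e with
  | nil => simp at h1
  | cons c t =>
  simp only [List.head?_cons, Option.some.injEq] at h1
  subst h1
  simp only [List.tail_cons] at ht
  rw [PySem.Chars.endswith_iff]
  constructor
  · rintro ⟨pre, rfl⟩
    exact pvRPartDot_append pre t ht
  · intro h
    exact pvRPartDot_suffix h

-- A's inner scan equals B's single lookup, for any pair list of good keys whose commands contain "{}"
lemma pvInner_eq (pairs : List (List Char × List Char))
    (hg : ∀ p ∈ pairs, pvGoodExt p.1)
    (hc : ∀ p ∈ pairs, PySem.Chars.isIn ['{', '}'] p.2 = true)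
    (w : List Char) :
    pvInnerA pairs w =
      match pvRPartDot w with
      | none => none
      | some s =>
        match (PySem.Dict.mk pairs).get? s with
        | none => none
        | some cmd => some (pvFormat cmd [w, PySem.Chars.replace w s [], PySem.Chars.replace w s []]) := by
  induction pairs with
  | nil =>
    cases h : pvRPartDot w <;> simp [pvInnerA, PySem.Dict.get?]
  | cons p rest ih =>
    obtain ⟨e, cmd⟩ := p
    have hge : pvGoodExt e := hg _ (List.mem_cons_self ..)
    have hce := hc _ (List.mem_cons_self ..)
    have ihr := ih (fun q hq => hg q (List.mem_cons_of_mem _ hq))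
      (fun q hq => hc q (List.mem_cons_of_mem _ hq))
    cases h : pvRPartDot w with
    | none =>
      have hne : PySem.Chars.endswith w e = false := by
        cases hev : PySem.Chars.endswith w e
        · rfl
        · rw [(pvEndswith_iff_rpart hge).mp hev] at h; cases h
      simp only [pvInnerA, hne, Bool.false_eq_true, if_false]
      rw [ihr, h]
    | some s =>
      by_cases hes : e = s
      · subst hes
        have hev : PySem.Chars.endswith w e = true := (pvEndswith_iff_rpart hge).mpr h
        simp only [pvInnerA, hev, if_true, hce]
        rw [PySem.Dict.get?_mk_cons]
        simp
      · have hne : PySem.Chars.endswith w e = false := by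
          cases hev : PySem.Chars.endswith w e
          · rfl
          · rw [(pvEndswith_iff_rpart hge).mp hev] at h
            exact absurd (Option.some.inj h) hes
        simp only [pvInnerA, hne, Bool.false_eq_true, if_false]
        rw [ihr, h, PySem.Dict.get?_mk_cons]
        simp [show (e == s) = false from beq_eq_false_iff_ne.mpr hes]

lemma pvExts_good : ∀ p ∈ pvExts, pvGoodExt p.1 := by
  simp only [pvGoodExt]; decide

lemma pvExts_braces : ∀ p ∈ pvExts, PySem.Chars.isIn ['{', '}'] p.2 = true := by decide

lemma pvOuter_eq (words : List (List Char)) : pvOuterA words = pvOuterB words := by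
  induction words with
  | nil => rfl
  | cons w ws ih =>
    simp only [pvOuterA, pvOuterB, pvInner_eq pvExts pvExts_good pvExts_braces w]
    cases h : pvRPartDot w with
    | none => simpa using ih
    | some s =>
      simp only [pvDictB]
      cases hg : (PySem.Dict.mk pvExts).get? s with
      | none => simp [ih]
      | some cmd => simp

-- ===== VERDICT (by name: the statement is the Claim_ definition above) =====
theorem enforce_correct_command_spec : Claim_equal_enforce_correct_command := by
  intro u c _
  show enforce_correct_command u c = enforce_correct_command_alt u c
  unfold enforce_correct_command enforce_correct_command_alt
  rw [pvOuter_eq]
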